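-- pv_equiv track=rewrite | github.com/yungwood/advent-of-code | 2023/day_11/solve.py | get_expanded_galaxy_locations
-- ===== SOURCE A (Python) =====
-- def get_expanded_galaxy_locations(galaxy_locations, empty_planes, size):
--     new_locations = []
--     for galaxy in galaxy_locations:
--         x_empty = len(list(filter(lambda z: (z < galaxy[0]), empty_planes[0])))
--         y_empty = len(list(filter(lambda z: (z < galaxy[1]), empty_planes[1])))
--         new_locations.append([galaxy[0] + (x_empty * size),
--                               galaxy[1] + (y_empty * size)])
--     return new_locations
-- ===== SOURCE B (Python) =====
-- def get_expanded_galaxy_locations(galaxy_locations, empty_planes, size):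
--     xs = sorted(empty_planes[0])
--     ys = sorted(empty_planes[1])
--
--     def count_less(a, v):
--         # bisect_left's loop (module not importable here): number of elements < v in sorted a
--         lo, hi = 0, len(a)
--         while lo < hi:
--             mid = (lo + hi) // 2
--             if a[mid] < v:
--                 lo = mid + 1
--             else:
--                 hi = mid
--         return lo
--
--     return [[g[0] + count_less(xs, g[0]) * size,
--              g[1] + count_less(ys, g[1]) * size]
--             for g in galaxy_locations]
-- ===== Notes on version B (the rewrite author's own statement) =====
-- stated objective: faster
-- what changed: B sorts each empty-plane list once up front and counts preceding empty planes per galaxy by binary search (bisect_left's loop) instead of filtering the whole list for every galaxy.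
-- outside the precondition, e.g. on get_expanded_galaxy_locations([], [], 1): A returns [], B raises IndexError
import Mathlib
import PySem

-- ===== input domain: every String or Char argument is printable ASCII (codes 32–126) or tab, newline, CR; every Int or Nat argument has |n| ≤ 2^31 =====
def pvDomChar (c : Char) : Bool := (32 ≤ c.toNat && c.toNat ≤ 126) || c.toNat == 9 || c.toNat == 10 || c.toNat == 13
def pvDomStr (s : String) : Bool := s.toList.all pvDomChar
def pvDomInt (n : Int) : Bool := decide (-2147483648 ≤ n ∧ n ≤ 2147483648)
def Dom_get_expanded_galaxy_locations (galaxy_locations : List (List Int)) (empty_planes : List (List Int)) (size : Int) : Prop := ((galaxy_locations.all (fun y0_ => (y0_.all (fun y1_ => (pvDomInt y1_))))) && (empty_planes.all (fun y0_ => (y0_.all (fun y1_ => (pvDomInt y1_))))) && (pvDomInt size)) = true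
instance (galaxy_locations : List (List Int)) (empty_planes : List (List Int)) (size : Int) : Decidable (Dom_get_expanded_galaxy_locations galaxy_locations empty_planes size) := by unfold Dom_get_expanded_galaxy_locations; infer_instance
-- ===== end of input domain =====

-- B replaces A's per-galaxy linear filter over the empty-plane lists by a one-time sort
-- plus a binary-search count per galaxy (objective: faster; a timing run measures it).
-- Pre_ excludes the inputs where B's up-front indexing empty_planes[0]/[1] raises: B needs
-- len(empty_planes) >= 2 even when galaxy_locations is empty, where A returns [] untouched.

-- ===== PORT A =====
def get_expanded_galaxy_locations (galaxy_locations : List (List Int)) (empty_planes : List (List Int)) (size : Int) : List (List Int) :=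
  galaxy_locations.foldl (fun new_locations galaxy =>
    -- galaxy[0], galaxy[1], empty_planes[0], empty_planes[1]: in range on Pre_ (getD default never used)
    let g0 := (PySem.List.pyGet? galaxy 0).getD 0
    let g1 := (PySem.List.pyGet? galaxy 1).getD 0
    let ep0 := (PySem.List.pyGet? empty_planes 0).getD []
    let ep1 := (PySem.List.pyGet? empty_planes 1).getD []
    let x_empty : Int := ((ep0.filter (fun z => decide (z < g0))).length : Int)
    let y_empty : Int := ((ep1.filter (fun z => decide (z < g1))).length : Int)
    new_locations ++ [[g0 + x_empty * size, g1 + y_empty * size]]) []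

-- ===== PORT B =====
-- Source B's count_less is exactly bisect_left's lo/hi loop (the bisect module is not importable
-- there); PySem.List.bisectLeft is that very loop, so the port cites it.
def get_expanded_galaxy_locations_alt (galaxy_locations : List (List Int)) (empty_planes : List (List Int)) (size : Int) : List (List Int) :=
  let xs := PySem.List.sorted ((PySem.List.pyGet? empty_planes 0).getD []) (fun z => z) false
  let ys := PySem.List.sorted ((PySem.List.pyGet? empty_planes 1).getD []) (fun z => z) false
  galaxy_locations.map (fun g =>
    let g0 := (PySem.List.pyGet? g 0).getD 0
    let g1 := (PySem.List.pyGet? g 1).getD 0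
    [g0 + (PySem.List.bisectLeft xs g0 : Int) * size,
     g1 + (PySem.List.bisectLeft ys g1 : Int) * size])

-- ===== PRECONDITION & SPEC =====
-- Pre_ excludes (besides A's own IndexErrors: a galaxy row shorter than 2, and
-- empty_planes shorter than 2 with galaxy_locations nonempty) the one corner where A
-- returns: galaxy_locations = [] with empty_planes shorter than 2 — A returns [] without
-- ever indexing empty_planes, while B's up-front sorted(empty_planes[0]) raises IndexError.
def Pre_get_expanded_galaxy_locations (galaxy_locations : List (List Int)) (empty_planes : List (List Int)) (size : Int) : Prop :=
  2 ≤ empty_planes.length ∧ ∀ g ∈ galaxy_locations, 2 ≤ g.length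
instance (galaxy_locations : List (List Int)) (empty_planes : List (List Int)) (size : Int) : Decidable (Pre_get_expanded_galaxy_locations galaxy_locations empty_planes size) := by unfold Pre_get_expanded_galaxy_locations; infer_instance
def pvWitness_get_expanded_galaxy_locations : List (List Int) × List (List Int) × Int := ([[1, 5], [4, 9]], [[2, 3], [0, 7]], 2)

def Spec_get_expanded_galaxy_locations (galaxy_locations : List (List Int)) (empty_planes : List (List Int)) (size : Int) (out : List (List Int)) : Prop := out = get_expanded_galaxy_locations_alt galaxy_locations empty_planes size
instance (galaxy_locations : List (List Int)) (empty_planes : List (List Int)) (size : Int) (out : List (List Int)) : Decidable (Spec_get_expanded_galaxy_locations galaxy_locations empty_planes size out) := by unfold Spec_get_expanded_galaxy_locations; infer_instance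

-- ===== CLAIM (what is proved, stated in full; the proofs are below) =====
def Claim_equal_get_expanded_galaxy_locations : Prop := ∀ (galaxy_locations : List (List Int)) (empty_planes : List (List Int)) (size : Int), Dom_get_expanded_galaxy_locations galaxy_locations empty_planes size → Pre_get_expanded_galaxy_locations galaxy_locations empty_planes size → Spec_get_expanded_galaxy_locations galaxy_locations empty_planes size (get_expanded_galaxy_locations galaxy_locations empty_planes size)

-- ===== LEMMAS AND PROOFS =====

-- If the first r positions of s satisfy p and the rest do not, then countP p s = r.
theorem countP_eq_of_prefix (p : Int → Bool) : ∀ (s : List Int) (r : Nat), r ≤ s.length →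
    (∀ j (h : j < s.length), j < r → p s[j]) →
    (∀ j (h : j < s.length), r ≤ j → ¬ p s[j] = true) →
    s.countP p = r := by
  intro s
  induction s with
  | nil => intro r hr _ _; simpa using (Nat.le_zero.mp hr).symm
  | cons a t ih =>
    intro r hr hlo hhi
    cases r with
    | zero =>
      have ha : ¬ p a = true := hhi 0 (by simp) (Nat.zero_le _)
      have ht : t.countP p = 0 := by
        apply ih 0 (Nat.zero_le _) (by intro j h hj; omega)
        intro j h _
        exact hhi (j + 1) (by simpa using Nat.succ_lt_succ h) (Nat.zero_le _)
      simp [List.countP_cons, ha, ht]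
    | succ r' =>
      have ha : p a = true := hlo 0 (by simp) (Nat.succ_pos _)
      have ht : t.countP p = r' := by
        apply ih r' (by simpa using Nat.succ_le_succ_iff.mp hr)
        · intro j h hj
          exact hlo (j + 1) (by simpa using Nat.succ_lt_succ h) (Nat.succ_lt_succ hj)
        · intro j h hj
          exact hhi (j + 1) (by simpa using Nat.succ_lt_succ h) (Nat.succ_le_succ hj)
      simp [List.countP_cons, ha, ht]

-- bisect_left on sorted(e) counts exactly the elements of e below v (A's filter length).
theorem bisectLeft_sorted_eq_filter_length (e : List Int) (v : Int) :
    PySem.List.bisectLeft (PySem.List.sorted e (fun z => z) false) v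
      = (e.filter (fun z => decide (z < v))).length := by
  set s := PySem.List.sorted e (fun z => z) false with hs
  obtain ⟨hle, hlo, hhi⟩ := PySem.List.bisectLeft_spec s v (by
    simpa using PySem.List.sorted_pairwise e (fun z => z))
  have hcount : s.countP (fun z => decide (z < v)) = PySem.List.bisectLeft s v := by
    apply countP_eq_of_prefix _ s _ hle
    · intro j h hj; simpa using hlo j h hj
    · intro j h hj; simpa using not_lt.mpr (hhi j h hj)
  have hperm : s.Perm e := PySem.List.sorted_perm e (fun z => z) false
  calc PySem.List.bisectLeft s v
      = s.countP (fun z => decide (z < v)) := hcount.symm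
    _ = e.countP (fun z => decide (z < v)) := hperm.countP_eq _
    _ = (e.filter (fun z => decide (z < v))).length := List.countP_eq_length_filter

-- ===== VERDICT (by name: the statement is the Claim_ definition above) =====
theorem get_expanded_galaxy_locations_spec : Claim_equal_get_expanded_galaxy_locations := by
  intro gl ep size _ hpre
  obtain ⟨hep, hgl⟩ := hpre
  unfold Spec_get_expanded_galaxy_locations
  obtain ⟨e0, e1, rest, rfl⟩ : ∃ e0 e1 rest, ep = e0 :: e1 :: rest := by
    match ep, hep with
    | e0 :: e1 :: rest, _ => exact ⟨e0, e1, rest, rfl⟩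
  unfold get_expanded_galaxy_locations get_expanded_galaxy_locations_alt
  rw [PySem.List.foldl_append_singleton_eq_map]
  simp only [List.nil_append]
  apply List.map_congr_left
  intro g hg
  obtain ⟨a, b, t, rfl⟩ : ∃ a b t, g = a :: b :: t := by
    match g, hgl g hg with
    | a :: b :: t, _ => exact ⟨a, b, t, rfl⟩
  simp only [PySem.List.pyGet?, bisectLeft_sorted_eq_filter_length]
  rfl
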